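/- GENERATED by farm/mkstatement.py from design/units.tsv (unit `start_decoder.5`) and the assertions of Vorbis/Spec/StartDecoderA.lean — do not edit.
   THE STATEMENT of the proof unit `start_decoder.5`: segment 5 of `start_decoder` (42 instructions; entries 0x113e77;
   exits 0x113b22,0x113f28; ranges 0x113e51-0x113ef9)
   takes each of its entry assertions to one of its exit assertions (`Vorbis.Spec.StartDecoder.Seg5`), given the contracts of its callees.
   What the names mean: Vorbis/Spec/Basic.lean (the shared hypotheses), Vorbis/Spec/StartDecoderA.lean (the assertions). The theorem to prove:
   `theorem start_decoder_5_ok : Vorbis.Spec.start_decoder_5.Statement`. -/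
import Vorbis.Spec.Alloc
import Vorbis.Spec.Leaves
import Vorbis.Spec.Reader
import Vorbis.Spec.StartDecoderA
namespace Vorbis.Spec.start_decoder_5
open X86 X86.User Asan

/-- The statement of unit `start_decoder.5`. -/
def Statement : Prop :=
  ∀ (Lay : Layout) (_hLay : Lay.hi = 0x1000000) (μ : Microarch) (_hμ : UserX.MicroOK μ) (u₀ : State)
    (_hcode : HasCodeNat Lay u₀ Vorbis.L.start_decoder.entry Vorbis.Code.code_start_decoder.nat Vorbis.L.start_decoder.size)
    (_h_get8_packet : ∀ (others : List Obj) (frames : List (Nat × FrameLayout)) (Blk : Block → Prop) (len : Nat), Calls Lay μ Vorbis.WayInv (Vorbis.conv u₀) Vorbis.L.get8_packet.entry (Vorbis.Spec.get8_packet.spec others frames Blk len))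
    (_h_asan_store1_noabort : Asan.SmallCheck Lay μ Vorbis.WayInv (Vorbis.CodeOK u₀) [.rax, .rdx] 1 Vorbis.L.__asan_store1_noabort.entry)
    (_h_vorbis_validate : ∀ (others : List Obj) (frames : List (Nat × FrameLayout)), Calls Lay μ Vorbis.WayInv (Vorbis.conv u₀) Vorbis.L.vorbis_validate.entry (Vorbis.Spec.vorbis_validate.spec others frames))
    (_h_get32_packet : ∀ (others : List Obj) (frames : List (Nat × FrameLayout)) (Blk : Block → Prop) (len : Nat), Calls Lay μ Vorbis.WayInv (Vorbis.conv u₀) Vorbis.L.get32_packet.entry (Vorbis.Spec.get32_packet.spec others frames Blk len))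
    (_h_setup_malloc : ∀ (others : List Obj) (frames : List (Nat × FrameLayout)) (A : Arena), Calls Lay μ Vorbis.WayInv (Vorbis.conv u₀) Vorbis.L.setup_malloc.entry (Vorbis.Spec.setup_malloc.spec others frames A))
    (_h_asan_store8_noabort : Asan.SmallCheck Lay μ Vorbis.WayInv (Vorbis.CodeOK u₀) [.rax, .rcx, .rdx] 8 Vorbis.L.__asan_store8_noabort.entry)
    (_h_error : ∀ (others : List Obj) (frames : List (Nat × FrameLayout)), Calls Lay μ Vorbis.WayInv (Vorbis.conv u₀) Vorbis.L.error.entry (Vorbis.Spec.error.spec others frames)),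
    Vorbis.Spec.StartDecoder.Seg5 Lay μ u₀

end Vorbis.Spec.start_decoder_5
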